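-- pv_equiv track=rewrite | github.com/C2DH/journal-of-digital-history-backend | dashboard/socialmedia/bluesky.py | parse_tweets_md
-- ===== SOURCE A (Python) =====
-- def parse_tweets_md(content: str):
--     lines = content.splitlines()
--     mode = None
--     thread_texts, independent = [], []
--     for line in lines:
--         if line.strip().startswith("Post thread:"):
--             mode = "thread"
--             continue
--         if line.strip().startswith("As independent posts:"):
--             mode = "independent"
--             continue
--         if not line.strip() or mode is None:
--             continue
--         if mode == "thread" and line.lstrip()[0].isdigit() and "." in line:
--             thread_texts.append(line.split(".", 1)[1].strip())
--         elif mode == "independent" and line.lstrip().startswith("-"):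
--             independent.append(line.lstrip("-").strip())
--     return thread_texts, independent
-- ===== SOURCE B (Python) =====
-- def parse_tweets_md(content: str):
--     lines = content.splitlines()
--     # drop everything before the first section header
--     while lines and _header(lines[0]) is None:
--         lines = lines[1:]
--     return _sections(lines)
--
-- def _header(line):
--     s = line.strip()
--     if s.startswith("Post thread:"):
--         return "thread"
--     if s.startswith("As independent posts:"):
--         return "independent"
--     return None
--
-- def _sections(lines):
--     # lines is empty or starts with a section header line
--     if not lines:
--         return [], []
--     mode = _header(lines[0])
--     body, rest = [], lines[1:]
--     while rest and _header(rest[0]) is None: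
--         body.append(rest[0])
--         rest = rest[1:]
--     thread, indep = _sections(rest)
--     if mode == "thread":
--         return [_num_text(l) for l in body if _is_num(l)] + thread, indep
--     return thread, [_dash_text(l) for l in body if _is_dash(l)] + indep
--
-- def _is_num(l):
--     return l.lstrip()[:1].isdigit() and "." in l
--
-- def _num_text(l):
--     return l.split(".", 1)[1].strip()
--
-- def _is_dash(l):
--     return l.lstrip().startswith("-")
--
-- def _dash_text(l):
--     return l.lstrip("-").strip()
-- ===== Notes on version B (the rewrite author's own statement) =====
-- stated objective: alternative
-- what changed: Replaces A's single stateful loop (a mode variable switched and consulted on every line, transforming and appending inline) with a recursive descent over header-delimited blocks: skip the preamble, split off each section's body with takeWhile/dropWhile, shape the body with a filter-and-map per section kind, and recurse on the remainder.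
import Mathlib
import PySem

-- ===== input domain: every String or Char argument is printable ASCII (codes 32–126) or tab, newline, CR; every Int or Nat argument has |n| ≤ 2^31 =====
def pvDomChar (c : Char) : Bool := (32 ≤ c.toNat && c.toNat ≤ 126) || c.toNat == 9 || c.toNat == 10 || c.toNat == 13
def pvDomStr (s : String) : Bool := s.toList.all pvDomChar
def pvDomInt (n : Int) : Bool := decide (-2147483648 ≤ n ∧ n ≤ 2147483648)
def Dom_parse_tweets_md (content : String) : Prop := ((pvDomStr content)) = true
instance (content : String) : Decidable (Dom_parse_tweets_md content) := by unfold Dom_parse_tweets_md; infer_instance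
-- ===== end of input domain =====

-- B replaces A's single stateful mode-switching loop by a recursive descent over header-delimited
-- blocks (skip preamble, split off each section body, shape it, recurse); objective: alternative.

-- ===== PORT A =====
-- A's loop body, branches in A's order; every leaf expression inline as in the Python.
-- line.lstrip()[0] is ported via pyGet? (none = Python's IndexError, unreachable: the line's
-- strip() is non-blank there); line.lstrip("-") is ported by hand as dropWhile (== '-'),
-- exact for the single-character strip set "-".
def stepA (st : Option String × List String × List String) (line : String) :
    Option String × List String × List String :=
  if PySem.Str.startswith (PySem.Str.strip line) "Post thread:" then
    (some "thread", st.2.1, st.2.2)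
  else if PySem.Str.startswith (PySem.Str.strip line) "As independent posts:" then
    (some "independent", st.2.1, st.2.2)
  else if PySem.Str.strip line == "" || st.1 == none then st
  else if st.1 == some "thread"
      && (match PySem.Str.pyGet? (PySem.Str.lstrip line) 0 with
          | some c => PySem.Chars.isdigit c
          | none => false)
      && PySem.Str.isIn "." line then
    (st.1, st.2.1 ++ [PySem.Str.strip (((PySem.Str.splitMax? line "." 1).getD []).getD 1 "")], st.2.2)
  else if st.1 == some "independent" && PySem.Str.startswith (PySem.Str.lstrip line) "-" then
    (st.1, st.2.1, st.2.2 ++ [PySem.Str.strip (String.ofList (line.toList.dropWhile (fun c => c == '-')))])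
  else st

def parse_tweets_md (content : String) : List String × List String :=
  let res := (PySem.Str.splitlines content).foldl stepA (none, [], [])
  (res.2.1, res.2.2)

-- ===== PORT B =====
-- _header
def headerOf (line : String) : Option String :=
  if PySem.Str.startswith (PySem.Str.strip line) "Post thread:" then some "thread"
  else if PySem.Str.startswith (PySem.Str.strip line) "As independent posts:" then some "independent"
  else none

-- _is_num: l.lstrip()[:1].isdigit() and "." in l   ([:1] is List.slice none (some 1))
def isNum (l : String) : Bool :=
  PySem.Chars.strIsdigit (PySem.List.slice (PySem.Chars.lstrip l.toList) none (some 1))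
    && PySem.Str.isIn "." l

-- _num_text: l.split(".", 1)[1].strip()   (splitMax? is none only for sep = "")
def numText (l : String) : String :=
  PySem.Str.strip (((PySem.Str.splitMax? l "." 1).getD []).getD 1 "")

-- _is_dash: l.lstrip().startswith("-")
def isDash (l : String) : Bool := PySem.Str.startswith (PySem.Str.lstrip l) "-"

-- _dash_text: l.lstrip("-").strip()   (lstrip("-") ported by hand as dropWhile (== '-'): exact)
def dashText (l : String) : String :=
  PySem.Str.strip (String.ofList (l.toList.dropWhile (fun c => c == '-')))

-- _sections: recursive descent over header-delimited blocks; the while-loop collecting the body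
-- is takeWhile/dropWhile, the two comprehensions are filter-then-map.
def sections : List String → List String × List String
  | [] => ([], [])
  | l :: rest =>
    let body := rest.takeWhile (fun x => headerOf x == none)
    let rest' := rest.dropWhile (fun x => headerOf x == none)
    let s := sections rest'
    if headerOf l == some "thread" then
      ((body.filter isNum).map numText ++ s.1, s.2)
    else
      (s.1, (body.filter isDash).map dashText ++ s.2)
termination_by lines => lines.length
decreasing_by
  exact Nat.lt_succ_of_le (List.length_dropWhile_le ..)

-- the preamble-skipping while-loop is dropWhile
def parse_tweets_md_alt (content : String) : List String × List String :=
  sections ((PySem.Str.splitlines content).dropWhile (fun x => headerOf x == none))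

-- ===== PRECONDITION & SPEC =====
def Spec_parse_tweets_md (content : String) (out : List String × List String) : Prop := out = parse_tweets_md_alt content
instance (content : String) (out : List String × List String) : Decidable (Spec_parse_tweets_md content out) := by unfold Spec_parse_tweets_md; infer_instance

-- ===== CLAIM (what is proved, stated in full; the proofs are below) =====
def Claim_equal_parse_tweets_md : Prop := ∀ (content : String), Dom_parse_tweets_md content → Spec_parse_tweets_md content (parse_tweets_md content)

-- ===== LEMMAS AND PROOFS =====

-- proof-only helper: what `sections` computes on the lines FOLLOWING a header of mode m
def secWith (m : String) (lines : List String) : List String × List String :=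
  let body := lines.takeWhile (fun x => headerOf x == none)
  let rest := lines.dropWhile (fun x => headerOf x == none)
  let s := sections rest
  if m == "thread" then ((body.filter isNum).map numText ++ s.1, s.2)
  else (s.1, (body.filter isDash).map dashText ++ s.2)

lemma headerOf_cases (l : String) :
    headerOf l = none ∨ headerOf l = some "thread" ∨ headerOf l = some "independent" := by
  unfold headerOf; split_ifs <;> simp

lemma headerOf_none (l : String) (h : headerOf l = none) :
    PySem.Chars.startswith (PySem.Chars.strip l.toList)
      ['P','o','s','t',' ','t','h','r','e','a','d',':'] = false ∧
    PySem.Chars.startswith (PySem.Chars.strip l.toList)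
      ['A','s',' ','i','n','d','e','p','e','n','d','e','n','t',' ','p','o','s','t','s',':'] = false := by
  unfold headerOf at h
  split_ifs at h with a b
  exact ⟨by simpa using a, by simpa using b⟩

lemma headerOf_thread (l : String) (h : headerOf l = some "thread") :
    PySem.Chars.startswith (PySem.Chars.strip l.toList)
      ['P','o','s','t',' ','t','h','r','e','a','d',':'] = true := by
  unfold headerOf at h
  split_ifs at h with a b
  · simpa using a
  · simp at h

lemma headerOf_indep (l : String) (h : headerOf l = some "independent") :
    PySem.Chars.startswith (PySem.Chars.strip l.toList)
      ['P','o','s','t',' ','t','h','r','e','a','d',':'] = false ∧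
    PySem.Chars.startswith (PySem.Chars.strip l.toList)
      ['A','s',' ','i','n','d','e','p','e','n','d','e','n','t',' ','p','o','s','t','s',':'] = true := by
  unfold headerOf at h
  split_ifs at h with a b
  · simp at h
  · exact ⟨by simpa using a, by simpa using b⟩

lemma dropWhile_cons_head {α : Type} (p : α → Bool) :
    ∀ (l : List α) (c : α) (t : List α), l.dropWhile p = c :: t → p c = false := by
  intro l
  induction l with
  | nil => intro c t h; simp at h
  | cons a as ih =>
    intro c t h
    by_cases hp : p a
    · rw [List.dropWhile_cons_of_pos hp] at h
      exact ih c t h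
    · rw [List.dropWhile_cons_of_neg hp] at h
      cases h
      simpa using hp

lemma lstrip_nil_of_strip_nil (cs : List Char) (h : PySem.Chars.strip cs = []) :
    PySem.Chars.lstrip cs = [] := by
  have hx : PySem.Chars.rstrip (PySem.Chars.lstrip cs) = [] := h
  rw [PySem.Chars.rstrip] at hx
  have hL : PySem.Chars.lstrip cs = cs.dropWhile PySem.Chars.isspace := by
    simp [PySem.Chars.lstrip]
  rcases hd : PySem.Chars.lstrip cs with _ | ⟨c, t⟩
  · rfl
  · exfalso
    have hall : ∀ x ∈ (c :: t).reverse, PySem.Chars.isspace x := by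
      rw [← List.dropWhile_eq_nil_iff]
      simpa [hd] using congrArg List.reverse hx
    have hc : PySem.Chars.isspace c := hall c (by simp)
    have hhead : PySem.Chars.isspace c = false :=
      dropWhile_cons_head PySem.Chars.isspace cs c t (by rw [← hL]; exact hd)
    simp [hhead] at hc

lemma blank_conds (l : String) (h : PySem.Str.strip l = "") :
    isNum l = false ∧ isDash l = false := by
  have hl : PySem.Chars.lstrip l.toList = [] := by
    apply lstrip_nil_of_strip_nil
    have := congrArg String.toList h
    simpa using this
  constructor
  · simp [isNum, hl, PySem.Chars.strIsdigit, PySem.List.slice]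
  · simp [isDash, hl, PySem.Chars.startswith]

lemma condA_eq (l : String) :
    (match PySem.List.pyGet? (PySem.Chars.lstrip l.toList) 0 with
     | some c => PySem.Chars.isdigit c
     | none => false)
    = PySem.Chars.strIsdigit (PySem.List.slice (PySem.Chars.lstrip l.toList) none (some 1)) := by
  rcases hd : PySem.Chars.lstrip l.toList with _ | ⟨c, t⟩ <;>
    simp [PySem.List.pyGet?, PySem.List.pyIdx?, PySem.List.slice, PySem.Chars.strIsdigit]

lemma stepA_none_skip (l : String) (h : headerOf l = none) (tl il : List String) :
    stepA (none, tl, il) l = (none, tl, il) := by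
  obtain ⟨h1, h2⟩ := headerOf_none l h
  simp [stepA, h1, h2]

lemma stepA_header_thread (r : String) (h : headerOf r = some "thread")
    (st : Option String × List String × List String) :
    stepA st r = (some "thread", st.2.1, st.2.2) := by
  have h1 := headerOf_thread r h
  simp [stepA, h1]

lemma stepA_header_indep (r : String) (h : headerOf r = some "independent")
    (st : Option String × List String × List String) :
    stepA st r = (some "independent", st.2.1, st.2.2) := by
  obtain ⟨h1, h2⟩ := headerOf_indep r h
  simp [stepA, h1, h2]

lemma stepA_thread (l : String) (h : headerOf l = none) (tl il : List String) :
    stepA (some "thread", tl, il) l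
      = (some "thread", tl ++ (if isNum l then [numText l] else []), il) := by
  obtain ⟨h1, h2⟩ := headerOf_none l h
  by_cases hb : PySem.Str.strip l = ""
  · obtain ⟨hn, _⟩ := blank_conds l hb
    simp [stepA, hb, hn, PySem.Chars.startswith]
  · by_cases hn : isNum l
    · have hn' := hn
      unfold isNum at hn'
      obtain ⟨hdig, hdot⟩ := Bool.and_eq_true _ _ |>.mp hn'
      have hmatch : (match PySem.List.pyGet? (PySem.Chars.lstrip l.toList) 0 with
          | some c => PySem.Chars.isdigit c
          | none => false) = true := by rw [condA_eq]; exact hdig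
      have hdot' : PySem.Chars.isIn ['.'] l.toList = true := by simpa using hdot
      simp [stepA, h1, h2, hb, hn, hmatch, hdot', numText]
    · have hn' : (PySem.Chars.strIsdigit
          (PySem.List.slice (PySem.Chars.lstrip l.toList) none (some 1))
          && PySem.Str.isIn "." l) = false := by
        simpa [isNum] using hn
      simp only [Bool.and_eq_false_iff] at hn'
      rcases hn' with hn' | hn'
      · have hmatch : (match PySem.List.pyGet? (PySem.Chars.lstrip l.toList) 0 with
            | some c => PySem.Chars.isdigit c
            | none => false) = false := by rw [condA_eq]; exact hn'
        simp [stepA, h1, h2, hb, hn, hmatch]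
      · have hdot' : PySem.Chars.isIn ['.'] l.toList = false := by simpa using hn'
        simp [stepA, h1, h2, hb, hn, hdot']

lemma stepA_indep (l : String) (h : headerOf l = none) (tl il : List String) :
    stepA (some "independent", tl, il) l
      = (some "independent", tl, il ++ (if isDash l then [dashText l] else [])) := by
  obtain ⟨h1, h2⟩ := headerOf_none l h
  by_cases hb : PySem.Str.strip l = ""
  · obtain ⟨_, hn⟩ := blank_conds l hb
    simp [stepA, hb, hn, PySem.Chars.startswith]
  · by_cases hn : isDash l
    · have hn' : PySem.Chars.startswith (PySem.Chars.lstrip l.toList) ['-'] = true := by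
        simpa [isDash] using hn
      simp [stepA, h1, h2, hb, hn, hn', dashText]
    · have hn' : PySem.Chars.startswith (PySem.Chars.lstrip l.toList) ['-'] = false := by
        simpa [isDash] using hn
      simp [stepA, h1, h2, hb, hn, hn']

lemma foldl_body_thread (body : List String) (hall : ∀ x ∈ body, headerOf x = none) :
    ∀ tl il, body.foldl stepA (some "thread", tl, il)
      = (some "thread", tl ++ (body.filter isNum).map numText, il) := by
  induction body with
  | nil => intro tl il; simp
  | cons l t ih =>
    intro tl il
    rw [List.foldl_cons, stepA_thread l (hall l (by simp)) tl il,
      ih (fun x hx => hall x (by simp [hx]))]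
    by_cases hn : isNum l <;> simp [hn]

lemma foldl_body_indep (body : List String) (hall : ∀ x ∈ body, headerOf x = none) :
    ∀ tl il, body.foldl stepA (some "independent", tl, il)
      = (some "independent", tl, il ++ (body.filter isDash).map dashText) := by
  induction body with
  | nil => intro tl il; simp
  | cons l t ih =>
    intro tl il
    rw [List.foldl_cons, stepA_indep l (hall l (by simp)) tl il,
      ih (fun x hx => hall x (by simp [hx]))]
    by_cases hn : isDash l <;> simp [hn]

lemma sections_cons_header (r : String) (rest : List String) (m : String)
    (h : headerOf r = some m) (hm : m = "thread" ∨ m = "independent") :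
    sections (r :: rest) = secWith m rest := by
  rw [sections, secWith]
  rcases hm with hm | hm <;> subst hm <;> simp [h]

lemma secWith_nil (m : String) (lines : List String)
    (hdrop : lines.dropWhile (fun x => headerOf x == none) = []) :
    secWith m lines =
      (if m == "thread"
       then (((lines.takeWhile (fun x => headerOf x == none)).filter isNum).map numText, [])
       else ([], ((lines.takeWhile (fun x => headerOf x == none)).filter isDash).map dashText)) := by
  simp only [secWith]
  rw [hdrop]
  split <;> simp [sections]

lemma secWith_cons (m : String) (lines : List String) (r : String) (rest'' : List String)
    (hdrop : lines.dropWhile (fun x => headerOf x == none) = r :: rest'')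
    (m' : String) (hm' : headerOf r = some m') (hm2 : m' = "thread" ∨ m' = "independent") :
    secWith m lines =
      (if m == "thread"
       then (((lines.takeWhile (fun x => headerOf x == none)).filter isNum).map numText
              ++ (secWith m' rest'').1, (secWith m' rest'').2)
       else ((secWith m' rest'').1,
             ((lines.takeWhile (fun x => headerOf x == none)).filter isDash).map dashText
              ++ (secWith m' rest'').2)) := by
  simp only [secWith]
  rw [hdrop, sections_cons_header r rest'' m' hm' hm2]
  split <;> simp only [secWith]

lemma foldl_sec : ∀ (n : Nat) (lines : List String), lines.length ≤ n →
    ∀ (m : String) (tl il : List String), (m = "thread" ∨ m = "independent") →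
    (lines.foldl stepA (some m, tl, il)).2
      = (tl ++ (secWith m lines).1, il ++ (secWith m lines).2) := by
  intro n
  induction n with
  | zero =>
    intro lines hlen m tl il hm
    have hnil : lines = [] := List.eq_nil_of_length_eq_zero (Nat.le_zero.mp hlen)
    subst hnil
    rcases hm with hm | hm <;> subst hm <;> simp [secWith, sections]
  | succ n ih =>
    intro lines hlen m tl il hm
    have hsplit := List.takeWhile_append_dropWhile
      (p := fun x => headerOf x == none) (l := lines)
    have hall : ∀ x ∈ lines.takeWhile (fun x => headerOf x == none), headerOf x = none := by
      intro x hx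
      simpa using List.mem_takeWhile_imp hx
    have hfold : lines.foldl stepA (some m, tl, il)
        = (lines.dropWhile (fun x => headerOf x == none)).foldl stepA
            ((lines.takeWhile (fun x => headerOf x == none)).foldl stepA (some m, tl, il)) := by
      conv_lhs => rw [← hsplit]
      rw [List.foldl_append]
    rcases hr : lines.dropWhile (fun x => headerOf x == none) with _ | ⟨r, rest''⟩
    · rcases hm with hm | hm <;> subst hm
      · rw [hfold, hr, List.foldl_nil, foldl_body_thread _ hall, secWith_nil "thread" lines hr]
        simp
      · rw [hfold, hr, List.foldl_nil, foldl_body_indep _ hall,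
          secWith_nil "independent" lines hr]
        simp
    · have hrh : headerOf r = none → False := by
        intro hno
        have := dropWhile_cons_head (fun x => headerOf x == none) lines r rest'' hr
        simp [hno] at this
      obtain hm' : headerOf r = some "thread" ∨ headerOf r = some "independent" := by
        rcases headerOf_cases r with h | h | h
        · exact absurd h hrh
        · exact Or.inl h
        · exact Or.inr h
      have hlen'' : rest''.length ≤ n := by
        have h1 : (lines.dropWhile (fun x => headerOf x == none)).length ≤ lines.length :=
          List.length_dropWhile_le ..
        rw [hr] at h1
        simp at h1
        omega
      rcases hm with hm | hm <;> subst hm <;> rcases hm' with hm' | hm'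
      · rw [hfold, hr, foldl_body_thread _ hall, List.foldl_cons, stepA_header_thread r hm',
          ih rest'' hlen'' "thread" _ _ (Or.inl rfl),
          secWith_cons "thread" lines r rest'' hr "thread" hm' (Or.inl rfl)]
        simp
      · rw [hfold, hr, foldl_body_thread _ hall, List.foldl_cons, stepA_header_indep r hm',
          ih rest'' hlen'' "independent" _ _ (Or.inr rfl),
          secWith_cons "thread" lines r rest'' hr "independent" hm' (Or.inr rfl)]
        simp
      · rw [hfold, hr, foldl_body_indep _ hall, List.foldl_cons, stepA_header_thread r hm',
          ih rest'' hlen'' "thread" _ _ (Or.inl rfl),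
          secWith_cons "independent" lines r rest'' hr "thread" hm' (Or.inl rfl)]
        simp
      · rw [hfold, hr, foldl_body_indep _ hall, List.foldl_cons, stepA_header_indep r hm',
          ih rest'' hlen'' "independent" _ _ (Or.inr rfl),
          secWith_cons "independent" lines r rest'' hr "independent" hm' (Or.inr rfl)]
        simp

lemma foldl_pre (lines : List String) :
    lines.foldl stepA (none, [], [])
      = (lines.dropWhile (fun x => headerOf x == none)).foldl stepA (none, [], []) := by
  induction lines with
  | nil => rfl
  | cons l t ih =>
    by_cases h : headerOf l = none
    · rw [List.foldl_cons, stepA_none_skip l h, List.dropWhile_cons_of_pos (by simp [h])]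
      exact ih
    · rw [List.dropWhile_cons_of_neg (by simp [h])]

-- ===== VERDICT (by name: the statement is the Claim_ definition above) =====
theorem parse_tweets_md_spec : Claim_equal_parse_tweets_md := by
  intro content _
  unfold Spec_parse_tweets_md parse_tweets_md parse_tweets_md_alt
  rw [foldl_pre]
  rcases hd : (PySem.Str.splitlines content).dropWhile (fun x => headerOf x == none)
    with _ | ⟨r, rest⟩
  · simp [sections]
  · have hrh : headerOf r = none → False := by
      intro hno
      have := dropWhile_cons_head (fun x => headerOf x == none)
        (PySem.Str.splitlines content) r rest hd
      simp [hno] at this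
    obtain hm : headerOf r = some "thread" ∨ headerOf r = some "independent" := by
      rcases headerOf_cases r with h | h | h
      · exact absurd h hrh
      · exact Or.inl h
      · exact Or.inr h
    rcases hm with hm | hm
    · rw [List.foldl_cons, stepA_header_thread r hm,
        sections_cons_header r rest "thread" hm (Or.inl rfl)]
      have := foldl_sec rest.length rest le_rfl "thread" [] [] (Or.inl rfl)
      simp at this ⊢
      rw [this]
    · rw [List.foldl_cons, stepA_header_indep r hm,
        sections_cons_header r rest "independent" hm (Or.inr rfl)]
      have := foldl_sec rest.length rest le_rfl "independent" [] [] (Or.inr rfl)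
      simp at this ⊢
      rw [this]
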